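-- pv_equiv track=rewrite | github.com/ffufcok/KIB_Homework | HW_1/Stack_Machine.py | del_func
-- ===== SOURCE A (Python) =====
-- def del_func(lst):
--     result = []
--     flag = 0
--     for elem in lst:
--         if flag == 1 and elem == ';':
--             flag = 0
--         elif elem == ':':
--             flag = 1
--         elif flag == 0:
--             result.append(elem)
--     return result
-- ===== SOURCE B (Python) =====
-- def del_func(lst):
--     result = []
--     n = len(lst)
--     i = 0
--     while i < n:
--         if lst[i] == ':':
--             i += 1
--             while i < n and lst[i] != ';':
--                 i += 1
--             i += 1  # consume the closing ';' (if any)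
--         else:
--             result.append(lst[i])
--             i += 1
--     return result
-- ===== Notes on version B (the rewrite author's own statement) =====
-- stated objective: simpler
-- what changed: Replaces the flag-state flat loop with an index-based loop whose nested inner loop skips each ':'..';' span directly, eliminating the flag variable.
import Mathlib
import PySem

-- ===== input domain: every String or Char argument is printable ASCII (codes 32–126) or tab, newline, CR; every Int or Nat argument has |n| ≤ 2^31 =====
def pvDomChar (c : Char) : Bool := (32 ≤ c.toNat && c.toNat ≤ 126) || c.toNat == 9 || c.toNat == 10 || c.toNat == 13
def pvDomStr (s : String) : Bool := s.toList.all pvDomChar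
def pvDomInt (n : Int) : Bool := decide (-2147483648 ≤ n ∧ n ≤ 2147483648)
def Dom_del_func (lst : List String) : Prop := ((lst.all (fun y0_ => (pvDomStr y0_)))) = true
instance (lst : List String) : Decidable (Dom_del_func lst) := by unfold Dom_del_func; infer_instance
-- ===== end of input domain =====

-- B replaces A's flag-state flat loop by an index loop with a nested span-skipping loop (simpler: no flag variable).

-- ===== PORT A =====
-- A's for-loop over (result, flag), branches in A's order.
def delFuncGoA : List String → List String → Int → List String
  | [], res, _ => res
  | e :: rest, res, flag =>
    if flag = 1 ∧ e = ";" then delFuncGoA rest res 0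
    else if e = ":" then delFuncGoA rest res 1
    else if flag = 0 then delFuncGoA rest (res ++ [e]) flag
    else delFuncGoA rest res flag

def del_func (lst : List String) : List String := delFuncGoA lst [] 0

-- ===== PORT B =====
-- B's inner while: advance past elements until (and including) the first ';'.
def delFuncSkip : List String → List String
  | [] => []
  | e :: rest => if e = ";" then rest else delFuncSkip rest

theorem delFuncSkip_length_le : ∀ (l : List String), (delFuncSkip l).length ≤ l.length := by
  intro l
  induction l with
  | nil => simp [delFuncSkip]
  | cons e rest ih =>
    simp only [delFuncSkip]
    split
    · simp
    · exact Nat.le_trans ih (Nat.le_succ _)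

-- B's outer while: append the element, or on ':' skip the span.
def delFuncGoB : List String → List String
  | [] => []
  | e :: rest =>
    if e = ":" then delFuncGoB (delFuncSkip rest)
    else e :: delFuncGoB rest
termination_by l => l.length
decreasing_by
  · exact Nat.lt_succ_of_le (delFuncSkip_length_le rest)
  · simp

def del_func_alt (lst : List String) : List String := delFuncGoB lst

-- ===== PRECONDITION & SPEC =====
def Spec_del_func (lst : List String) (out : List String) : Prop := out = del_func_alt lst
instance (lst : List String) (out : List String) : Decidable (Spec_del_func lst out) := by unfold Spec_del_func; infer_instance

-- ===== CLAIM (what is proved, stated in full; the proofs are below) =====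
def Claim_equal_del_func : Prop := ∀ (lst : List String), Dom_del_func lst → Spec_del_func lst (del_func lst)

-- ===== LEMMAS AND PROOFS =====

-- In flag=1 state, A's loop behaves like skipping the span then continuing in flag=0 state.
theorem goA_one_eq_skip : ∀ (l : List String) (res : List String),
    delFuncGoA l res 1 = delFuncGoA (delFuncSkip l) res 0 := by
  intro l
  induction l with
  | nil => intro res; simp [delFuncGoA, delFuncSkip]
  | cons e rest ih =>
    intro res
    by_cases hsemi : e = ";"
    · simp [delFuncGoA, delFuncSkip, hsemi]
    · by_cases hcolon : e = ":"
      · simp [delFuncGoA, delFuncSkip, hcolon, ih]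
      · simp [delFuncGoA, delFuncSkip, hsemi, hcolon, ih]

-- A's loop in flag=0 state computes res ++ B's result.
theorem goA_zero_eq_goB : ∀ (n : ℕ) (l : List String), l.length ≤ n →
    ∀ (res : List String), delFuncGoA l res 0 = res ++ delFuncGoB l := by
  intro n
  induction n with
  | zero =>
    intro l hl res
    have : l = [] := List.length_eq_zero_iff.mp (Nat.le_zero.mp hl)
    subst this
    simp [delFuncGoA, delFuncGoB]
  | succ n ih =>
    intro l hl res
    cases l with
    | nil => simp [delFuncGoA, delFuncGoB]
    | cons e rest =>
      have hrest : rest.length ≤ n := Nat.le_of_succ_le_succ hl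
      by_cases hcolon : e = ":"
      · have hskip : (delFuncSkip rest).length ≤ n :=
          Nat.le_trans (delFuncSkip_length_le rest) hrest
        simp only [delFuncGoA, delFuncGoB, hcolon]
        rw [goA_one_eq_skip, ih _ hskip]
        simp
      · simp [delFuncGoA, delFuncGoB, hcolon, ih _ hrest]

-- ===== VERDICT (by name: the statement is the Claim_ definition above) =====
theorem del_func_spec : Claim_equal_del_func := by
  intro lst _
  unfold Spec_del_func del_func del_func_alt
  simpa using goA_zero_eq_goB lst.length lst (Nat.le_refl _) []
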